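-- pv_equiv track=rewrite | github.com/dianaabdirahmanova711-tech/homeworks | lab1/1.task.py | multi_symmetric_difference
-- ===== SOURCE A (Python) =====
-- def multi_symmetric_difference(a):
--     if len(a)==0:
--         return []
--     result=set()
--     for i in a:
--         new=set()
--         for j in result:
--             if j not in i:
--                 new.add(j)
--         for j in i:
--             if j not in result:
--                 new.add(j)
--         result=new
--     return result
-- ===== SOURCE B (Python) =====
-- def multi_symmetric_difference(a):
--     if len(a) == 0:
--         return []
--     counts = {}
--     for lst in a:
--         # distinct elements of lst in first-occurrence order
--         for x in dict.fromkeys(lst):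
--             counts[x] = counts.pop(x, 0) + 1
--     return {x for x, c in counts.items() if c % 2 == 1}
-- ===== Notes on version B (the rewrite author's own statement) =====
-- stated objective: faster
-- what changed: A folds pairwise symmetric differences, rescanning the whole accumulated set against each iterable (with a linear 'j not in i' list scan inside); B makes one pass that counts, in a move-to-end dict, how many iterables contain each distinct element and then returns the elements with an odd count.
import Mathlib
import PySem

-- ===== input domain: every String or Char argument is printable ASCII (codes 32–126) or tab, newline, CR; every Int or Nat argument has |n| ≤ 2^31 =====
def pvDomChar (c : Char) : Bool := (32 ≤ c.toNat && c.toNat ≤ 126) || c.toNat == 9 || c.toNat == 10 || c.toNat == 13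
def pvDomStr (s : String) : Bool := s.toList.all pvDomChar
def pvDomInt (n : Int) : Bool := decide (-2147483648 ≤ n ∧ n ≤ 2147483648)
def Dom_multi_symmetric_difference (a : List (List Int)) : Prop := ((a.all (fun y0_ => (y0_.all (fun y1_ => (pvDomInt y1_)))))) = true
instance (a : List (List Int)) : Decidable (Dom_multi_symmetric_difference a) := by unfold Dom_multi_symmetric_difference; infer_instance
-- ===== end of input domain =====

-- B replaces A's quadratic pairwise symmetric-difference fold by one counting pass
-- (a move-to-end dict of per-iterable distinct-element counts) plus an odd-count filter (objective: faster).

-- ===== PORT A =====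
def multi_symmetric_difference (a : List (List Int)) : List Int :=
  if a.length == 0 then []
  else
    a.foldl (fun result i =>
      -- new = set(); for j in result: if j not in i: new.add(j)
      let new := result.foldl (fun new j => if !(i.contains j) then PySem.Set.add new j else new)
        PySem.Set.empty
      -- for j in i: if j not in result: new.add(j)
      i.foldl (fun new j => if !(result.contains j) then PySem.Set.add new j else new) new)
      PySem.Set.empty

-- ===== PORT B =====
def multi_symmetric_difference_alt (a : List (List Int)) : List Int :=
  if a.length == 0 then []
  else
    -- for lst in a: for x in dict.fromkeys(lst): counts[x] = counts.pop(x, 0) + 1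
    let counts := a.foldl (fun counts lst =>
      (PySem.List.dedup lst).foldl
        (fun d x => (d.erase x).insert x (d.getD x 0 + 1)) counts)
      PySem.Dict.empty
    -- {x for x, c in counts.items() if c % 2 == 1}  (keys are distinct, so this list is the set)
    (counts.items.filter (fun p => PySem.Int.mod p.2 2 == 1)).map (fun p => p.1)

-- ===== PRECONDITION & SPEC =====
def Spec_multi_symmetric_difference (a : List (List Int)) (out : List Int) : Prop := out = multi_symmetric_difference_alt a
instance (a : List (List Int)) (out : List Int) : Decidable (Spec_multi_symmetric_difference a out) := by unfold Spec_multi_symmetric_difference; infer_instance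

-- ===== CLAIM (what is proved, stated in full; the proofs are below) =====
def Claim_equal_multi_symmetric_difference : Prop := ∀ (a : List (List Int)), Dom_multi_symmetric_difference a → Spec_multi_symmetric_difference a (multi_symmetric_difference a)

-- ===== LEMMAS AND PROOFS =====

-- A's loop body over one iterable i, starting from the accumulated set `result`.
def aStep (result i : List Int) : List Int :=
  let new := result.foldl (fun new j => if !(i.contains j) then PySem.Set.add new j else new)
    PySem.Set.empty
  i.foldl (fun new j => if !(result.contains j) then PySem.Set.add new j else new) new

-- B's loop body over one iterable lst, updating the count table.
def bStep (counts : PySem.Dict Int Int) (lst : List Int) : PySem.Dict Int Int :=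
  (PySem.List.dedup lst).foldl (fun d x => (d.erase x).insert x (d.getD x 0 + 1)) counts

def oddB (c : Int) : Bool := PySem.Int.mod c 2 == 1

-- the set B's final comprehension extracts from a count table
def oddKeys (d : PySem.Dict Int Int) : List Int :=
  (d.items.filter (fun p => oddB p.2)).map (fun p => p.1)

theorem oddB_succ (c : Int) : oddB (c + 1) = !(oddB c) := by
  unfold oddB
  rw [PySem.Int.mod_eq_emod_of_pos (by norm_num), PySem.Int.mod_eq_emod_of_pos (by norm_num)]
  have h2 : (c + 1) % 2 = 1 - c % 2 := by omega
  rcases Int.emod_two_eq_zero_or_one c with h | h <;> simp [h2, h]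

theorem ofList_filter (p : Int → Bool) (l : List Int) :
    PySem.Set.ofList (l.filter p) = (PySem.Set.ofList l).filter p := by
  induction l with
  | nil => rfl
  | cons x xs ih =>
    by_cases hx : p x = true
    · rw [List.filter_cons_of_pos hx, PySem.Set.ofList_cons, PySem.Set.ofList_cons, ih]
      rw [List.filter_cons_of_pos hx]
      simp only [PySem.Set.discard, List.filter_filter]
      congr 1
      apply List.filter_congr
      intro y _
      exact Bool.and_comm _ _
    · rw [List.filter_cons_of_neg hx, PySem.Set.ofList_cons, ih, List.filter_cons_of_neg hx]
      simp only [PySem.Set.discard, List.filter_filter]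
      apply (List.filter_congr _).symm
      intro y _
      by_cases hy : y = x
      · subst hy; simp [hx]
      · simp [hy]

theorem contains_ofList (i : List Int) (j : Int) :
    List.contains (PySem.Set.ofList i) j = i.contains j := by
  simp only [List.contains_eq_mem]
  by_cases h : j ∈ i <;> simp [h, PySem.Set.mem_ofList]

-- A's step, in closed form: the survivors of result, then the fresh elements of i.
theorem aStep_eq (result i : List Int) (h : result.Nodup) :
    aStep result i
      = result.filter (fun j => !(i.contains j))
        ++ PySem.Set.ofList (i.filter (fun j => !(result.contains j))) := by
  unfold aStep
  rw [PySem.List.foldl_if_eq_foldl_filter (fun j => !(i.contains j)) PySem.Set.add,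
      PySem.List.foldl_if_eq_foldl_filter (fun j => !(result.contains j)) PySem.Set.add]
  have h1 : List.foldl PySem.Set.add PySem.Set.empty (result.filter (fun j => !(i.contains j)))
      = result.filter (fun j => !(i.contains j)) := by
    have : List.foldl PySem.Set.add PySem.Set.empty (result.filter (fun j => !(i.contains j)))
        = PySem.Set.ofList (result.filter (fun j => !(i.contains j))) := rfl
    rw [this, PySem.Set.ofList_eq_self_of_nodup _ (h.filter _)]
  rw [h1]
  have h2 : List.foldl PySem.Set.add (result.filter (fun j => !(i.contains j)))
        (i.filter (fun j => !(result.contains j)))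
      = PySem.Set.update (result.filter (fun j => !(i.contains j)))
        (i.filter (fun j => !(result.contains j))) := rfl
  rw [h2, PySem.Set.update_eq_append_filter]
  congr 1
  apply List.filter_eq_self.mpr
  intro y hy
  rw [PySem.Set.mem_ofList, List.mem_filter] at hy
  have hnr : y ∉ result := by simpa using hy.2
  simp [PySem.Set.contains_eq_listContains, List.contains_eq_mem, List.mem_filter, hnr]

theorem find?_filter_ne (x x' : Int) (hne : x' ≠ x) (l : List (Int × Int)) :
    (l.filter (fun p => !(p.1 == x))).find? (fun p => p.1 == x')
      = l.find? (fun p => p.1 == x') := by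
  induction l with
  | nil => rfl
  | cons q l ih =>
    by_cases hq : q.1 = x
    · rw [List.filter_cons_of_neg (by simp [hq])]
      rw [ih, List.find?_cons_of_neg (by simp [hq]; exact fun h => hne h.symm)]
    · rw [List.filter_cons_of_pos (by simp [hq])]
      by_cases hq' : q.1 = x'
      · rw [List.find?_cons_of_pos (by simp [hq']), List.find?_cons_of_pos (by simp [hq'])]
      · rw [List.find?_cons_of_neg (by simp [hq']), List.find?_cons_of_neg (by simp [hq']), ih]

theorem getD_eraseInsert_of_ne (d : PySem.Dict Int Int) (x x' v : Int) (hne : x' ≠ x) :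
    ((d.erase x).insert x v).getD x' 0 = d.getD x' 0 := by
  unfold PySem.Dict.getD
  rw [PySem.Dict.get?_insert_of_ne _ _ hne]
  have : (d.erase x).get? x' = d.get? x' := by
    simp only [PySem.Dict.get?, PySem.Dict.erase]
    rw [find?_filter_ne x x' hne]
  rw [this]

theorem contains_erase_self (d : PySem.Dict Int Int) (x : Int) :
    (d.erase x).contains x = false := by
  simp only [PySem.Dict.contains, PySem.Dict.erase]
  simp [List.any_filter]

-- items of B's inner loop: untouched entries first (keys outside L), then L's entries bumped by one.
theorem bStep_items (L : List Int) (hL : L.Nodup) :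
    ∀ (d : PySem.Dict Int Int), d.keys.Nodup →
    (L.foldl (fun d x => (d.erase x).insert x (d.getD x 0 + 1)) d).items
      = d.items.filter (fun p => !(L.contains p.1)) ++ L.map (fun x => (x, d.getD x 0 + 1)) := by
  induction L with
  | nil => intro d _; simp
  | cons x L' ih =>
    intro d hd
    have hxL' : x ∉ L' := (List.nodup_cons.mp hL).1
    have hL' : L'.Nodup := (List.nodup_cons.mp hL).2
    set d1 := (d.erase x).insert x (d.getD x 0 + 1) with hd1
    have hitems : d1.items = (d.items.filter (fun p => !(p.1 == x))) ++ [(x, d.getD x 0 + 1)] := by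
      rw [hd1, PySem.Dict.items_insert_of_not_contains _ _ (contains_erase_self d x)]
      rfl
    have hkeys : d1.keys.Nodup := by
      simp only [PySem.Dict.keys, hitems, List.map_append]
      apply List.Nodup.append
      · exact (List.filter_sublist.map _).nodup hd
      · simp
      · intro y hy
        simp only [List.mem_map, List.mem_filter] at hy
        obtain ⟨p, ⟨_, hp⟩, rfl⟩ := hy
        simp_all
    simp only [List.foldl_cons]
    rw [ih hL' d1 hkeys]
    have hmap : L'.map (fun x' => (x', d1.getD x' 0 + 1)) = L'.map (fun x' => (x', d.getD x' 0 + 1)) := by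
      apply List.map_congr_left
      intro y hy
      have : y ≠ x := fun hyx => hxL' (hyx ▸ hy)
      rw [hd1, getD_eraseInsert_of_ne d x y _ this]
    rw [hmap, hitems, List.filter_append]
    rw [List.filter_cons_of_pos (by simp [hxL'])]
    simp only [List.filter_filter, List.filter_nil, List.map_cons]
    rw [List.append_assoc]
    congr 1
    apply List.filter_congr
    intro p _
    simp only [List.contains_cons]
    by_cases hp : p.1 = x <;> simp [hp, Bool.and_comm]

theorem nodup_oddKeys (d : PySem.Dict Int Int) (hd : d.keys.Nodup) : (oddKeys d).Nodup :=
  (List.filter_sublist.map _).nodup hd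

theorem contains_oddKeys (d : PySem.Dict Int Int) (hd : d.keys.Nodup) (x : Int) :
    (oddKeys d).contains x = oddB (d.getD x 0) := by
  rcases hg : d.get? x with _ | c
  · have hx : x ∉ oddKeys d := by
      intro hx
      simp only [oddKeys, List.mem_map, List.mem_filter] at hx
      obtain ⟨p, ⟨hp, _⟩, rfl⟩ := hx
      exact (PySem.Dict.get?_eq_none_iff_not_mem_keys d p.1).mp hg (PySem.Dict.mem_keys_of_mem_items d hp)
    have : d.getD x 0 = 0 := by simp [PySem.Dict.getD, hg]
    simp [this, List.contains_eq_mem, hx, oddB, PySem.Int.mod]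
  · have hgd : d.getD x 0 = c := by simp [PySem.Dict.getD, hg]
    rw [hgd]
    by_cases hodd : oddB c = true
    · have : x ∈ oddKeys d := by
        simp only [oddKeys, List.mem_map, List.mem_filter]
        exact ⟨(x, c), ⟨((PySem.Dict.get?_eq_some_iff_mem_items d x c hd).mp hg), hodd⟩, rfl⟩
      simp [List.contains_eq_mem, this, hodd]
    · have : x ∉ oddKeys d := by
        intro hx
        simp only [oddKeys, List.mem_map, List.mem_filter] at hx
        obtain ⟨p, ⟨hp, hpodd⟩, rfl⟩ := hx
        have := (PySem.Dict.get?_eq_some_iff_mem_items d p.1 p.2 hd).mpr (by simpa using hp)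
        rw [hg] at this
        exact hodd (by rw [Option.some_inj.mp this.symm] at hpodd; exact hpodd)
      simp [List.contains_eq_mem, this, Bool.eq_false_iff.mpr hodd]

-- the key step correspondence: A's set after one iterable = odd-count keys of B's table after it
theorem step_eq (d : PySem.Dict Int Int) (hd : d.keys.Nodup) (i : List Int) :
    aStep (oddKeys d) i = oddKeys (bStep d i) := by
  rw [aStep_eq _ _ (nodup_oddKeys d hd)]
  unfold bStep
  rw [PySem.List.dedup_eq_ofList]
  unfold oddKeys
  rw [bStep_items (PySem.Set.ofList i) (PySem.Set.nodup_ofList i) d hd]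
  rw [List.filter_append, List.map_append]
  congr 1
  · -- survivors
    rw [List.filter_map]
    congr 1
    rw [List.filter_filter, List.filter_filter]
    apply List.filter_congr
    intro p _
    simp only [Function.comp]
    rw [contains_ofList]
    exact Bool.and_comm _ _
  · -- fresh elements
    have hmm : ∀ (Y : List Int),
        ((Y.map (fun x => (x, d.getD x 0 + 1))).map (fun p => p.1)) = Y := by
      intro Y; rw [List.map_map]; exact List.map_id' Y
    rw [List.filter_map, hmm]
    rw [ofList_filter]
    apply List.filter_congr
    intro x _
    simp only [Function.comp]
    rw [oddB_succ, ← contains_oddKeys d hd x]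
    rfl

theorem nodup_keys_bStep (d : PySem.Dict Int Int) (hd : d.keys.Nodup) (i : List Int) :
    (bStep d i).keys.Nodup := by
  unfold bStep
  rw [PySem.List.dedup_eq_ofList]
  simp only [PySem.Dict.keys]
  rw [bStep_items (PySem.Set.ofList i) (PySem.Set.nodup_ofList i) d hd, List.map_append]
  have hmm : (List.map (fun x => (x, d.getD x 0 + 1)) (PySem.Set.ofList i)).map (fun x => x.1)
      = PySem.Set.ofList i := by
    rw [List.map_map]; exact List.map_id' _
  apply List.Nodup.append
  · exact (List.filter_sublist.map _).nodup hd
  · rw [hmm]; exact PySem.Set.nodup_ofList i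
  · intro y hy1 hy2
    rw [hmm] at hy2
    rcases List.mem_map.mp hy1 with ⟨p, hp, rfl⟩
    have h1 := (List.mem_filter.mp hp).2
    rw [contains_ofList] at h1
    have : p.1 ∉ i := by simpa [List.contains_eq_mem] using h1
    exact this ((PySem.Set.mem_ofList _ _).mp hy2)

theorem fold_eq (a : List (List Int)) :
    ∀ (d : PySem.Dict Int Int), d.keys.Nodup →
    a.foldl aStep (oddKeys d) = oddKeys (a.foldl bStep d) := by
  induction a with
  | nil => intro d _; rfl
  | cons i a' ih =>
    intro d hd
    simp only [List.foldl_cons]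
    rw [step_eq d hd i]
    exact ih (bStep d i) (nodup_keys_bStep d hd i)

-- ===== VERDICT (by name: the statement is the Claim_ definition above) =====
theorem multi_symmetric_difference_spec : Claim_equal_multi_symmetric_difference := by
  intro a _
  unfold Spec_multi_symmetric_difference multi_symmetric_difference multi_symmetric_difference_alt
  by_cases h : a.length == 0
  · simp [h]
  · simp only [h, Bool.false_eq_true, if_false]
    have := fold_eq a PySem.Dict.empty (by simp [PySem.Dict.keys, PySem.Dict.empty])
    have hstart : oddKeys PySem.Dict.empty = PySem.Set.empty := rfl
    rw [hstart] at this
    exact this.trans rfl
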